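-- pv_equiv track=rewrite | github.com/microsoft/qsharp | pyqir_circuit/circuit_builder.py | transform_to_col_row
-- ===== SOURCE A (Python) =====
-- from typing import List, Optional, Any, Tuple, Dict
--
-- def transform_to_col_row(
--     aligned_ops: List[List[Optional[int]]],
-- ) -> List[List[Optional[int]]]:
--     """
--     Transforms a row-col 2D array into an equivalent col-row 2D array.
--     """
--     if not aligned_ops:
--         return []
--
--     num_rows = len(aligned_ops)
--     num_cols = max(len(row) for row in aligned_ops) if aligned_ops else 0
--
--     col_row_array: List[List[Optional[int]]] = [
--         [None for _ in range(num_rows)] for _ in range(num_cols)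
--     ]
--
--     for row_idx, row_data in enumerate(aligned_ops):
--         for col_idx, value in enumerate(row_data):
--             if col_idx < len(col_row_array):
--                 col_row_array[col_idx][row_idx] = value
--
--     return col_row_array
-- ===== SOURCE B (Python) =====
-- from typing import List, Optional
--
--
-- def transform_to_col_row(
--     aligned_ops: List[List[Optional[int]]],
-- ) -> List[List[Optional[int]]]:
--     """
--     Transforms a row-col 2D array into an equivalent col-row 2D array by a
--     single online pass: columns are grown on demand (back-filled with None
--     for the rows already seen) and every existing column gets this row's
--     entry, or None, appended at its tail.  No global max/grid pre-allocation.
--     """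
--     cols: List[List[Optional[int]]] = []
--     for row_idx, row in enumerate(aligned_ops):
--         # create any new columns this row reaches, back-filled with None
--         while len(cols) < len(row):
--             cols.append([None] * row_idx)
--         # append this row's entry (or None) to the tail of every column
--         for col_idx, col in enumerate(cols):
--             col.append(row[col_idx] if col_idx < len(row) else None)
--     return cols
-- ===== Notes on version B (the rewrite author's own statement) =====
-- stated objective: alternative
-- what changed: Instead of computing the global max row length, pre-allocating a None grid and scatter-assigning cells by [col][row] index, B makes one online pass over the rows, growing the list of columns on demand (new columns back-filled with None for rows already seen) and appending each row's entry or None at the tail of every column.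
import Mathlib
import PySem

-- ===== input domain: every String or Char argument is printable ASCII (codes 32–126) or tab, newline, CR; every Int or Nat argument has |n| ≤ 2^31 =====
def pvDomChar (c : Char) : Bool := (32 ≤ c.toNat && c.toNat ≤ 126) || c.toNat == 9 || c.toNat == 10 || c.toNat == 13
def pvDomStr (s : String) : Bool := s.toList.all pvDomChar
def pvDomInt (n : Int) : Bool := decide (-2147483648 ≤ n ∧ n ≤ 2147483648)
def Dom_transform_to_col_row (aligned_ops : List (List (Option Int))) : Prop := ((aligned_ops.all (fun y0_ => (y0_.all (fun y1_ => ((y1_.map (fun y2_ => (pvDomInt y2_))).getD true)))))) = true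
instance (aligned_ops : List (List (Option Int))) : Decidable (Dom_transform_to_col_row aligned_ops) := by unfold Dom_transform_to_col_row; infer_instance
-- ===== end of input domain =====

-- B transposes in one online pass that grows the columns on demand (back-filling
-- new columns with None) and appends each row's entry or None to every column's
-- tail, instead of A's max-sized pre-allocated None grid filled by [col][row]
-- scatter-assignment; objective: alternative. Return values proved equal on all inputs.

-- ===== PORT A =====
-- inner loop: 'for col_idx, value in enumerate(row_data): if col_idx < len(grid): grid[col_idx][row_idx] = value'
def pvInnerA (ri : Nat) : Nat → List (Option Int) → List (List (Option Int)) → List (List (Option Int))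
  | _, [], g => g
  | ci, v :: rest, g =>
      pvInnerA ri (ci + 1) rest
        (if ci < g.length then g.set ci ((g.getD ci []).set ri v) else g)

-- outer loop: 'for row_idx, row_data in enumerate(aligned_ops): …'
def pvOuterA : Nat → List (List (Option Int)) → List (List (Option Int)) → List (List (Option Int))
  | _, [], g => g
  | ri, row :: rest, g => pvOuterA (ri + 1) rest (pvInnerA ri 0 row g)

def transform_to_col_row (aligned_ops : List (List (Option Int))) : List (List (Option Int)) :=
  if aligned_ops = [] then []
  else
    let num_rows := aligned_ops.length
    let num_cols := (PySem.List.max? (aligned_ops.map List.length) (fun x => x)).getD 0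
    let col_row_array := List.replicate num_cols (List.replicate num_rows (none : Option Int))
    pvOuterA 0 aligned_ops col_row_array

-- ===== PORT B =====
-- 'for col_idx, col in enumerate(cols): col.append(row[col_idx] if col_idx < len(row) else None)'
-- ('row[col_idx] if col_idx < len(row) else None' is exactly row.getD col_idx none)
def pvAppendRow (row : List (Option Int)) : Nat → List (List (Option Int)) → List (List (Option Int))
  | _, [] => []
  | i, col :: cs => (col ++ [row.getD i none]) :: pvAppendRow row (i + 1) cs

-- 'while len(cols) < len(row): cols.append([None] * row_idx)'
def pvGrow (cols : List (List (Option Int))) (n ri : Nat) : List (List (Option Int)) :=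
  cols ++ List.replicate (n - cols.length) (List.replicate ri (none : Option Int))

-- outer loop: 'for row_idx, row in enumerate(aligned_ops): …'
def pvOuterB : Nat → List (List (Option Int)) → List (List (Option Int)) → List (List (Option Int))
  | _, cols, [] => cols
  | ri, cols, row :: rest => pvOuterB (ri + 1) (pvAppendRow row 0 (pvGrow cols row.length ri)) rest

def transform_to_col_row_alt (aligned_ops : List (List (Option Int))) : List (List (Option Int)) :=
  pvOuterB 0 [] aligned_ops

-- ===== PRECONDITION & SPEC =====
def Spec_transform_to_col_row (aligned_ops : List (List (Option Int))) (out : List (List (Option Int))) : Prop := out = transform_to_col_row_alt aligned_ops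
instance (aligned_ops : List (List (Option Int))) (out : List (List (Option Int))) : Decidable (Spec_transform_to_col_row aligned_ops out) := by unfold Spec_transform_to_col_row; infer_instance

-- ===== CLAIM (what is proved, stated in full; the proofs are below) =====
def Claim_equal_transform_to_col_row : Prop := ∀ (aligned_ops : List (List (Option Int))), Dom_transform_to_col_row aligned_ops → Spec_transform_to_col_row aligned_ops (transform_to_col_row aligned_ops)

-- ===== LEMMAS AND PROOFS =====

-- common yardstick: number of output columns, and the closed-form transpose
def pvMaxLen (rows : List (List (Option Int))) : Nat := (rows.map List.length).foldl max 0

def pvSpec (rows : List (List (Option Int))) : List (List (Option Int)) :=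
  (List.range (pvMaxLen rows)).map (fun c => rows.map (fun r => r.getD c none))

theorem pvFoldlMax_init (l : List Nat) (a : Nat) : l.foldl max a = max a (l.foldl max 0) := by
  induction l generalizing a with
  | nil => simp
  | cons b t ih =>
      simp only [List.foldl_cons]
      rw [ih (max a b), ih (max 0 b)]
      omega

theorem pvMaxLen_cons (r : List (Option Int)) (t : List (List (Option Int))) :
    pvMaxLen (r :: t) = max r.length (pvMaxLen t) := by
  unfold pvMaxLen
  simp only [List.map_cons, List.foldl_cons]
  rw [pvFoldlMax_init]
  omega

-- ---- B = pvSpec ----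
theorem pvAppendRow_getElem? (row : List (Option Int)) (cs : List (List (Option Int)))
    (i c : Nat) :
    (pvAppendRow row i cs)[c]? = cs[c]?.map (fun col => col ++ [row.getD (i + c) none]) := by
  induction cs generalizing i c with
  | nil => simp [pvAppendRow]
  | cons col cs ih =>
      cases c with
      | zero => simp [pvAppendRow]
      | succ n =>
          simp only [pvAppendRow, List.getElem?_cons_succ]
          rw [ih (i + 1) n, show i + 1 + n = i + (n + 1) by omega]

theorem pvOuterB_getElem? (rest : List (List (Option Int))) (ri : Nat)
    (cols : List (List (Option Int))) (c : Nat) :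
    (pvOuterB ri cols rest)[c]? =
      if c < max cols.length (pvMaxLen rest) then
        some (cols.getD c (List.replicate ri none) ++ rest.map (fun r => r.getD c none))
      else none := by
  induction rest generalizing ri cols with
  | nil =>
      simp only [pvOuterB, pvMaxLen, List.map_nil, List.foldl_nil, Nat.max_zero, List.map_nil,
        List.append_nil]
      by_cases hc : c < cols.length
      · rw [if_pos hc, List.getElem?_eq_getElem hc, List.getD_eq_getElem?_getD,
          List.getElem?_eq_getElem hc]
        rfl
      · rw [if_neg hc, List.getElem?_eq_none (by omega)]
  | cons row t ih =>
      simp only [pvOuterB]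
      rw [ih, pvMaxLen_cons]
      have hglen : (pvGrow cols row.length ri).length = max cols.length row.length := by
        unfold pvGrow; simp; omega
      have hlen : (pvAppendRow row 0 (pvGrow cols row.length ri)).length
          = max cols.length row.length := by
        have : ∀ cs i, (pvAppendRow row i cs).length = cs.length := by
          intro cs; induction cs with
          | nil => intro i; rfl
          | cons a b ihh => intro i; simp [pvAppendRow, ihh]
        rw [this, hglen]
      rw [hlen]
      have hcond : max (max cols.length row.length) (pvMaxLen t)
          = max cols.length (max row.length (pvMaxLen t)) := by omega
      rw [hcond]
      by_cases hc : c < max cols.length (max row.length (pvMaxLen t))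
      · rw [if_pos hc, if_pos hc]
        have hval : (pvAppendRow row 0 (pvGrow cols row.length ri)).getD c
              (List.replicate (ri + 1) none)
            = cols.getD c (List.replicate ri none) ++ [row.getD c none] := by
          rw [List.getD_eq_getElem?_getD, pvAppendRow_getElem?, Nat.zero_add]
          by_cases hg : c < (pvGrow cols row.length ri).length
          · rw [List.getElem?_eq_getElem hg, Option.map_some, Option.getD_some]
            congr 1
            unfold pvGrow at hg ⊢
            by_cases hcc : c < cols.length
            · rw [List.getElem_append_left hcc, List.getD_eq_getElem?_getD,
                List.getElem?_eq_getElem hcc]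
              rfl
            · rw [List.getElem_append_right (by omega)]
              rw [List.getD_eq_getElem?_getD, List.getElem?_eq_none (by omega)]
              simp
          · rw [List.getElem?_eq_none (by omega), Option.map_none, Option.getD_none]
            rw [hglen] at hg
            have h1 : ¬ c < cols.length := by omega
            have h2 : ¬ c < row.length := by omega
            rw [List.getD_eq_getElem?_getD (l := cols), List.getElem?_eq_none (l := cols) (by omega)]
            rw [List.getD_eq_getElem?_getD (l := row), List.getElem?_eq_none (l := row) (by omega)]
            simp [List.replicate_succ']
        rw [hval]
        simp
      · rw [if_neg hc, if_neg hc]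

theorem pvAlt_eq_spec (rows : List (List (Option Int))) :
    transform_to_col_row_alt rows = pvSpec rows := by
  apply List.ext_getElem?
  intro c
  unfold transform_to_col_row_alt
  rw [pvOuterB_getElem?]
  simp only [List.length_nil, Nat.max_eq_right (Nat.zero_le _), List.getD_nil,
    List.replicate_zero]
  unfold pvSpec
  by_cases hc : c < pvMaxLen rows
  · rw [if_pos hc, List.getElem?_map, List.getElem?_range hc]
    simp
  · rw [if_neg hc, List.getElem?_eq_none (by simpa using hc)]

-- ---- A = pvSpec ----
theorem pvInnerA_getElem? (ri : Nat) (row : List (Option Int)) (ci : Nat)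
    (g : List (List (Option Int))) (c : Nat) :
    (pvInnerA ri ci row g)[c]? =
      if ci ≤ c ∧ c < ci + row.length then
        g[c]?.map (fun col => col.set ri (row.getD (c - ci) none))
      else g[c]? := by
  induction row generalizing ci g with
  | nil => simp [pvInnerA]
  | cons v rest ih =>
      simp only [pvInnerA]
      rw [ih]
      by_cases hc : c = ci
      · subst hc
        by_cases hlen : c < g.length
        · rw [if_pos hlen, if_neg (by omega), if_pos ⟨le_refl c, by simp⟩]
          rw [List.getElem?_set_self' ]
          simp [List.getElem?_eq_getElem hlen, List.getD_eq_getElem?_getD]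
        · rw [if_neg hlen, if_neg (by omega), if_pos ⟨le_refl c, by simp⟩]
          rw [List.getElem?_eq_none (by omega)]
          simp
      · have hne : (if ci < g.length then g.set ci ((g.getD ci []).set ri v) else g)[c]? = g[c]? := by
          split
          · exact List.getElem?_set_ne (by omega)
          · rfl
        rw [hne]
        simp only [List.length_cons]
        by_cases h1 : ci ≤ c ∧ c < ci + (rest.length + 1)
        · rw [if_pos (by omega), if_pos h1, show c - ci = (c - (ci + 1)) + 1 by omega]
          simp
        · rw [if_neg (by omega), if_neg h1]

-- the per-column effect of the outer loop
def pvUpdCol (col : List (Option Int)) (ri : Nat) (rest : List (List (Option Int))) (c : Nat) :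
    List (Option Int) :=
  match rest with
  | [] => col
  | row :: t =>
      pvUpdCol (if c < row.length then col.set ri (row.getD c none) else col) (ri + 1) t c

theorem pvOuterA_getElem? (rest : List (List (Option Int))) (ri : Nat)
    (g : List (List (Option Int))) (c : Nat) :
    (pvOuterA ri rest g)[c]? = g[c]?.map (fun col => pvUpdCol col ri rest c) := by
  induction rest generalizing ri g with
  | nil => simp [pvOuterA, pvUpdCol]
  | cons row t ih =>
      simp only [pvOuterA]
      rw [ih]
      have hin := pvInnerA_getElem? ri row 0 g c
      simp only [Nat.zero_add, Nat.sub_zero, true_and, Nat.zero_le] at hin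
      rw [hin]
      by_cases hc : c < row.length
      · rw [if_pos hc]
        cases hg : g[c]? with
        | none => simp
        | some col => simp [pvUpdCol, hc]
      · rw [if_neg hc]
        cases hg : g[c]? with
        | none => simp
        | some col => simp [pvUpdCol, hc]

theorem pvUpdCol_repl (rows : List (List (Option Int))) (ri : Nat) (pre : List (Option Int))
    (hpre : pre.length = ri) (c : Nat) :
    pvUpdCol (pre ++ List.replicate rows.length none) ri rows c
      = pre ++ rows.map (fun r => r.getD c none) := by
  induction rows generalizing ri pre with
  | nil => simp [pvUpdCol]
  | cons row t ih =>
      simp only [pvUpdCol, List.length_cons, List.replicate_succ, List.map_cons]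
      have hset : ∀ v : Option Int,
          (pre ++ (none : Option Int) :: List.replicate t.length none).set ri v
            = (pre ++ [v]) ++ List.replicate t.length none := by
        intro v
        rw [← hpre, List.set_append_right _ _ (le_refl _)]
        simp
      by_cases hc : c < row.length
      · rw [if_pos hc, hset]
        rw [ih (ri + 1) (pre ++ [row.getD c none]) (by simp [hpre])]
        simp
      · rw [if_neg hc]
        have hval : row.getD c none = none := by
          rw [List.getD_eq_getElem?_getD, List.getElem?_eq_none (by omega)]
          rfl
        have hsplit : pre ++ (none : Option Int) :: List.replicate t.length none
             = (pre ++ [none]) ++ List.replicate t.length none := by simp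
        rw [hsplit, ih (ri + 1) (pre ++ [none]) (by simp [hpre]), hval]
        simp

theorem pvNumCols_eq (rows : List (List (Option Int))) (h : rows ≠ []) :
    (PySem.List.max? (rows.map List.length) (fun x => x)).getD 0 = pvMaxLen rows := by
  cases rows with
  | nil => simp at h
  | cons r t =>
      unfold pvMaxLen
      rw [List.map_cons, PySem.List.max?_id_cons]
      simp only [Option.getD_some, List.foldl_cons]
      rw [show max 0 r.length = r.length by omega]

theorem pvA_eq_spec (rows : List (List (Option Int))) :
    transform_to_col_row rows = pvSpec rows := by
  by_cases h : rows = []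
  · subst h; simp [transform_to_col_row, pvSpec, pvMaxLen]
  · simp only [transform_to_col_row, if_neg h]
    rw [pvNumCols_eq rows h]
    apply List.ext_getElem?
    intro c
    rw [pvOuterA_getElem?]
    by_cases hc : c < pvMaxLen rows
    · rw [List.getElem?_replicate, if_pos hc, Option.map_some]
      have hupd := pvUpdCol_repl rows 0 [] rfl c
      simp only [List.nil_append] at hupd
      rw [hupd]
      unfold pvSpec
      rw [List.getElem?_map, List.getElem?_range hc]
      rfl
    · rw [List.getElem?_eq_none (by simpa using hc)]
      unfold pvSpec
      rw [List.getElem?_eq_none (by simpa using hc)]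
      rfl

-- ===== VERDICT (by name: the statement is the Claim_ definition above) =====
theorem transform_to_col_row_spec : Claim_equal_transform_to_col_row := by
  intro aligned_ops _
  unfold Spec_transform_to_col_row
  rw [pvA_eq_spec, pvAlt_eq_spec]
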